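-- pv_equiv track=rewrite | github.com/iampopye/trio | trio/cli/onboard.py | _pick_best_model
-- ===== SOURCE A (Python) =====
-- def _pick_best_model(models: list[str]) -> str:
--     """Pick the best available model from Ollama."""
--     preferred = [
--         "llama3.1:8b", "llama3.2:3b", "llama3.2:1b", "llama3:8b",
--         "mistral:7b", "gemma2:9b", "phi3:3.8b",
--     ]
--     for p in preferred:
--         if p in models:
--             return p
--     return models[0] if models else "llama3.2:1b"
-- ===== SOURCE B (Python) =====
-- def _pick_best_model(models: list[str]) -> str:
--     """Pick the best available model from Ollama."""
--     preferred = [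
--         "llama3.1:8b", "llama3.2:3b", "llama3.2:1b", "llama3:8b",
--         "mistral:7b", "gemma2:9b", "phi3:3.8b",
--     ]
--     if not models:
--         return "llama3.2:1b"
--     rank = {name: i for i, name in enumerate(preferred)}
--     inf = len(preferred)
--     best = models[0]
--     best_r = rank.get(best, inf)
--     for m in models[1:]:
--         r = rank.get(m, inf)
--         if r < best_r:
--             best, best_r = m, r
--     return best
-- ===== Notes on version B (the rewrite author's own statement) =====
-- stated objective: alternative
-- what changed: Instead of scanning the preferred list and testing membership in models for each (O(P*N)), B builds a name->priority dict once and makes a single first-wins minimum pass over models, returning models[0] naturally when nothing is preferred.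
import Mathlib
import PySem

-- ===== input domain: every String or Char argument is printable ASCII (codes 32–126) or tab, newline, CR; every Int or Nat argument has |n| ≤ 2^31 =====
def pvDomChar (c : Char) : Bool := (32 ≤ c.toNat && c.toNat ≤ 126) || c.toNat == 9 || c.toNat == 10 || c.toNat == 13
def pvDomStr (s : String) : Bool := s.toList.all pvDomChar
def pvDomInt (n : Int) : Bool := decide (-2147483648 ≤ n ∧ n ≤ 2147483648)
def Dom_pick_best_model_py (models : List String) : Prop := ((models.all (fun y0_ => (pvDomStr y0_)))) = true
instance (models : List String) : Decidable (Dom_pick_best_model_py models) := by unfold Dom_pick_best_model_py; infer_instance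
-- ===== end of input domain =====

-- B replaces A's scan of the preferred list (membership test per entry) by one
-- first-wins minimum pass over `models` against a prebuilt name->priority dict.

-- ===== PORT A =====
def pvPreferred : List String :=
  ["llama3.1:8b", "llama3.2:3b", "llama3.2:1b", "llama3:8b",
   "mistral:7b", "gemma2:9b", "phi3:3.8b"]

-- the `for p in preferred: if p in models: return p` loop
def pvGoA (models : List String) : List String → String
  | [] => match models with
          | [] => "llama3.2:1b"
          | m :: _ => m
  | p :: rest => if p ∈ models then p else pvGoA models rest

def pick_best_model_py (models : List String) : String :=
  pvGoA models pvPreferred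

-- ===== PORT B =====
-- rank = {name: i for i, name in enumerate(preferred)}
def pvRank : PySem.Dict String Int :=
  (PySem.List.enumerate pvPreferred 0).foldl (fun d p => d.insert p.2 p.1) PySem.Dict.empty

-- body of the `for m in models[1:]` loop
def pvStepB (inf : Int) (acc : String × Int) (m : String) : String × Int :=
  let r := pvRank.getD m inf
  if r < acc.2 then (m, r) else acc

def pick_best_model_py_alt (models : List String) : String :=
  match models with
  | [] => "llama3.2:1b"
  | m0 :: rest =>
      let inf : Int := (pvPreferred.length : Int)
      (rest.foldl (pvStepB inf) (m0, pvRank.getD m0 inf)).1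

-- ===== PRECONDITION & SPEC =====
def Spec_pick_best_model_py (models : List String) (out : String) : Prop := out = pick_best_model_py_alt models
instance (models : List String) (out : String) : Decidable (Spec_pick_best_model_py models out) := by unfold Spec_pick_best_model_py; infer_instance

-- ===== CLAIM (what is proved, stated in full; the proofs are below) =====
def Claim_equal_pick_best_model_py : Prop := ∀ (models : List String), Dom_pick_best_model_py models → Spec_pick_best_model_py models (pick_best_model_py models)

-- ===== LEMMAS AND PROOFS =====

-- rank lookup with default, as a plain function
def pvRk (m : String) : Int := pvRank.getD m 7

lemma pvRank_eq : pvRank = PySem.Dict.mk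
    [("llama3.1:8b", (0 : Int)), ("llama3.2:3b", 1), ("llama3.2:1b", 2), ("llama3:8b", 3),
     ("mistral:7b", 4), ("gemma2:9b", 5), ("phi3:3.8b", 6)] := by decide

lemma pvRk_if (m : String) :
    pvRk m = if "llama3.1:8b" = m then 0 else if "llama3.2:3b" = m then 1
      else if "llama3.2:1b" = m then 2 else if "llama3:8b" = m then 3
      else if "mistral:7b" = m then 4 else if "gemma2:9b" = m then 5
      else if "phi3:3.8b" = m then 6 else 7 := by
  rw [pvRk, pvRank_eq]
  simp only [PySem.Dict.getD_eq_get?_getD, PySem.Dict.get?_mk_cons, beq_iff_eq]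
  split_ifs <;> rfl

lemma pvRk_bounds (m : String) : 0 ≤ pvRk m ∧ pvRk m ≤ 7 := by
  rw [pvRk_if]; split_ifs <;> omega

-- rank is injective below 7: a rank k < 7 pins the string
lemma pvRk_lt (m : String) (h : pvRk m < 7) :
    m = pvPreferred.getD (pvRk m).toNat "" := by
  rw [pvRk_if] at h ⊢
  split_ifs at h ⊢ <;> subst_vars <;> simp_all [pvPreferred]

-- running minimum of ranks
def pvM (l : List String) (r0 : Int) : Int := l.foldl (fun r m => min r (pvRk m)) r0

lemma pvM_le (l : List String) (r0 : Int) : pvM l r0 ≤ r0 := by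
  induction l generalizing r0 with
  | nil => simp [pvM]
  | cons m l ih => simpa [pvM] using le_trans (ih (min r0 (pvRk m))) (min_le_left _ _)

lemma pvM_le_mem (l : List String) (r0 : Int) : ∀ x ∈ l, pvM l r0 ≤ pvRk x := by
  induction l generalizing r0 with
  | nil => simp
  | cons m l ih =>
      intro x hx
      rcases List.mem_cons.mp hx with rfl | hx
      · exact le_trans (pvM_le l _) (by simp)
      · exact ih _ x hx

lemma pvM_cases (l : List String) (r0 : Int) :
    pvM l r0 = r0 ∨ ∃ x ∈ l, pvM l r0 = pvRk x := by
  induction l generalizing r0 with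
  | nil => simp [pvM]
  | cons m l ih =>
      rcases ih (min r0 (pvRk m)) with h | ⟨x, hx, h⟩
      · rcases le_or_gt r0 (pvRk m) with hc | hc
        · left; simpa [pvM, min_eq_left hc] using h
        · right; exact ⟨m, by simp, by simpa [pvM, min_eq_right (le_of_lt hc)] using h⟩
      · right; exact ⟨x, by simp [hx], by simpa [pvM] using h⟩

-- characterisation of B's fold
lemma pvFold_char (l : List String) (b : String) :
    (l.foldl (pvStepB 7) (b, pvRk b)).2 = pvRk (l.foldl (pvStepB 7) (b, pvRk b)).1
    ∧ (l.foldl (pvStepB 7) (b, pvRk b)).2 = pvM l (pvRk b)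
    ∧ ((l.foldl (pvStepB 7) (b, pvRk b)).2 = pvRk b → (l.foldl (pvStepB 7) (b, pvRk b)).1 = b) := by
  induction l generalizing b with
  | nil => exact ⟨rfl, rfl, fun _ => rfl⟩
  | cons m l ih =>
      by_cases hc : pvRk m < pvRk b
      · have hstep : pvStepB 7 (b, pvRk b) m = (m, pvRk m) := by
          show (if pvRk m < pvRk b then (m, pvRk m) else (b, pvRk b)) = (m, pvRk m)
          rw [if_pos hc]
        have hM : pvM (m :: l) (pvRk b) = pvM l (pvRk m) := by
          simp [pvM, min_eq_right (le_of_lt hc)]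
        refine ⟨?_, ?_, ?_⟩
        · simpa [List.foldl, hstep] using (ih m).1
        · simpa [List.foldl, hstep, hM] using (ih m).2.1
        · intro h
          exfalso
          have h2 := (ih m).2.1
          have hle := pvM_le l (pvRk m)
          simp only [List.foldl, hstep] at h
          omega
      · have hstep : pvStepB 7 (b, pvRk b) m = (b, pvRk b) := by
          show (if pvRk m < pvRk b then (m, pvRk m) else (b, pvRk b)) = (b, pvRk b)
          rw [if_neg hc]
        have hM : pvM (m :: l) (pvRk b) = pvM l (pvRk b) := by
          simp [pvM, min_eq_left (by omega : pvRk b ≤ pvRk m)]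
        refine ⟨?_, ?_, ?_⟩
        · simpa [List.foldl, hstep] using (ih b).1
        · simpa [List.foldl, hstep, hM] using (ih b).2.1
        · intro h
          simp only [List.foldl, hstep] at h ⊢
          exact (ih b).2.2 h
      

-- ===== VERDICT (by name: the statement is the Claim_ definition above) =====
theorem pick_best_model_py_spec : Claim_equal_pick_best_model_py := by
  intro models _
  unfold Spec_pick_best_model_py
  cases models with
  | nil => decide
  | cons m0 rest =>
    have hB : pick_best_model_py_alt (m0 :: rest) = (rest.foldl (pvStepB 7) (m0, pvRk m0)).1 := rfl
    obtain ⟨h1, h2, h3⟩ := pvFold_char rest m0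
    set res := rest.foldl (pvStepB 7) (m0, pvRk m0) with hresdef
    set Mv := pvM rest (pvRk m0) with hMvdef
    have hmin : ∀ x ∈ m0 :: rest, Mv ≤ pvRk x := by
      intro x hx
      rcases List.mem_cons.mp hx with rfl | hx
      · exact pvM_le rest (pvRk x)
      · exact pvM_le_mem rest (pvRk m0) x hx
    have hex : ∃ x ∈ m0 :: rest, pvRk x = Mv := by
      rcases pvM_cases rest (pvRk m0) with h | ⟨x, hx, h⟩
      · exact ⟨m0, by simp, h.symm⟩
      · exact ⟨x, by simp [hx], h.symm⟩
    obtain ⟨w, hwmem, hweq⟩ := hex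
    have hbw := pvRk_bounds w
    by_cases h7 : Mv = 7
    · -- no preferred name occurs in models: A falls through to models[0], B never updates
      have hall : ∀ x ∈ m0 :: rest, pvRk x = 7 := fun x hx =>
        le_antisymm (pvRk_bounds x).2 (h7 ▸ hmin x hx)
      have g0 : "llama3.1:8b" ∉ m0 :: rest := fun hm => absurd (hall _ hm) (by decide)
      have g1 : "llama3.2:3b" ∉ m0 :: rest := fun hm => absurd (hall _ hm) (by decide)
      have g2 : "llama3.2:1b" ∉ m0 :: rest := fun hm => absurd (hall _ hm) (by decide)
      have g3 : "llama3:8b" ∉ m0 :: rest := fun hm => absurd (hall _ hm) (by decide)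
      have g4 : "mistral:7b" ∉ m0 :: rest := fun hm => absurd (hall _ hm) (by decide)
      have g5 : "gemma2:9b" ∉ m0 :: rest := fun hm => absurd (hall _ hm) (by decide)
      have g6 : "phi3:3.8b" ∉ m0 :: rest := fun hm => absurd (hall _ hm) (by decide)
      have hA : pick_best_model_py (m0 :: rest) = m0 := by
        simp [pick_best_model_py, pvGoA, pvPreferred, g0, g1, g2, g3, g4, g5, g6]
      rw [hA, hB, h3 (by rw [h2, h7, hall m0 (by simp)])]
    · have hlt : Mv < 7 := lt_of_le_of_ne (hweq ▸ hbw.2) h7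
      have hge : (0 : Int) ≤ Mv := hweq ▸ hbw.1
      have hwp : w = pvPreferred.getD Mv.toNat "" := by rw [← hweq]; exact pvRk_lt w (hweq ▸ hlt)
      have hres1 : pvRk res.1 = Mv := by rw [← h1, h2]
      have hresp : res.1 = pvPreferred.getD Mv.toNat "" := by
        rw [← hres1]; exact pvRk_lt res.1 (by rw [hres1]; exact hlt)
      have hk : Mv = 0 ∨ Mv = 1 ∨ Mv = 2 ∨ Mv = 3 ∨ Mv = 4 ∨ Mv = 5 ∨ Mv = 6 := by omega
      rcases hk with h | h | h | h | h | h | h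
      · -- Mv = 0
        have hwk : "llama3.1:8b" ∈ m0 :: rest := by
          have hmm := hwmem; rw [hwp, h] at hmm; simpa [pvPreferred] using hmm
        have hr : res.1 = "llama3.1:8b" := by rw [hresp, h]; decide
        rw [hB, hr]
        simp [pick_best_model_py, pvGoA, pvPreferred, hwk]
      · -- Mv = 1
        have hwk : "llama3.2:3b" ∈ m0 :: rest := by
          have hmm := hwmem; rw [hwp, h] at hmm; simpa [pvPreferred] using hmm
        have g0 : "llama3.1:8b" ∉ m0 :: rest := by
          intro hm; have hq := hmin _ hm
          rw [show pvRk "llama3.1:8b" = (0 : Int) from by decide] at hq; omega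
        have hr : res.1 = "llama3.2:3b" := by rw [hresp, h]; decide
        rw [hB, hr]
        simp [pick_best_model_py, pvGoA, pvPreferred, hwk, g0]
      · -- Mv = 2
        have hwk : "llama3.2:1b" ∈ m0 :: rest := by
          have hmm := hwmem; rw [hwp, h] at hmm; simpa [pvPreferred] using hmm
        have g0 : "llama3.1:8b" ∉ m0 :: rest := by
          intro hm; have hq := hmin _ hm
          rw [show pvRk "llama3.1:8b" = (0 : Int) from by decide] at hq; omega
        have g1 : "llama3.2:3b" ∉ m0 :: rest := by
          intro hm; have hq := hmin _ hm
          rw [show pvRk "llama3.2:3b" = (1 : Int) from by decide] at hq; omega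
        have hr : res.1 = "llama3.2:1b" := by rw [hresp, h]; decide
        rw [hB, hr]
        simp [pick_best_model_py, pvGoA, pvPreferred, hwk, g0, g1]
      · -- Mv = 3
        have hwk : "llama3:8b" ∈ m0 :: rest := by
          have hmm := hwmem; rw [hwp, h] at hmm; simpa [pvPreferred] using hmm
        have g0 : "llama3.1:8b" ∉ m0 :: rest := by
          intro hm; have hq := hmin _ hm
          rw [show pvRk "llama3.1:8b" = (0 : Int) from by decide] at hq; omega
        have g1 : "llama3.2:3b" ∉ m0 :: rest := by
          intro hm; have hq := hmin _ hm
          rw [show pvRk "llama3.2:3b" = (1 : Int) from by decide] at hq; omega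
        have g2 : "llama3.2:1b" ∉ m0 :: rest := by
          intro hm; have hq := hmin _ hm
          rw [show pvRk "llama3.2:1b" = (2 : Int) from by decide] at hq; omega
        have hr : res.1 = "llama3:8b" := by rw [hresp, h]; decide
        rw [hB, hr]
        simp [pick_best_model_py, pvGoA, pvPreferred, hwk, g0, g1, g2]
      · -- Mv = 4
        have hwk : "mistral:7b" ∈ m0 :: rest := by
          have hmm := hwmem; rw [hwp, h] at hmm; simpa [pvPreferred] using hmm
        have g0 : "llama3.1:8b" ∉ m0 :: rest := by
          intro hm; have hq := hmin _ hm
          rw [show pvRk "llama3.1:8b" = (0 : Int) from by decide] at hq; omega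
        have g1 : "llama3.2:3b" ∉ m0 :: rest := by
          intro hm; have hq := hmin _ hm
          rw [show pvRk "llama3.2:3b" = (1 : Int) from by decide] at hq; omega
        have g2 : "llama3.2:1b" ∉ m0 :: rest := by
          intro hm; have hq := hmin _ hm
          rw [show pvRk "llama3.2:1b" = (2 : Int) from by decide] at hq; omega
        have g3 : "llama3:8b" ∉ m0 :: rest := by
          intro hm; have hq := hmin _ hm
          rw [show pvRk "llama3:8b" = (3 : Int) from by decide] at hq; omega
        have hr : res.1 = "mistral:7b" := by rw [hresp, h]; decide
        rw [hB, hr]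
        simp [pick_best_model_py, pvGoA, pvPreferred, hwk, g0, g1, g2, g3]
      · -- Mv = 5
        have hwk : "gemma2:9b" ∈ m0 :: rest := by
          have hmm := hwmem; rw [hwp, h] at hmm; simpa [pvPreferred] using hmm
        have g0 : "llama3.1:8b" ∉ m0 :: rest := by
          intro hm; have hq := hmin _ hm
          rw [show pvRk "llama3.1:8b" = (0 : Int) from by decide] at hq; omega
        have g1 : "llama3.2:3b" ∉ m0 :: rest := by
          intro hm; have hq := hmin _ hm
          rw [show pvRk "llama3.2:3b" = (1 : Int) from by decide] at hq; omega
        have g2 : "llama3.2:1b" ∉ m0 :: rest := by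
          intro hm; have hq := hmin _ hm
          rw [show pvRk "llama3.2:1b" = (2 : Int) from by decide] at hq; omega
        have g3 : "llama3:8b" ∉ m0 :: rest := by
          intro hm; have hq := hmin _ hm
          rw [show pvRk "llama3:8b" = (3 : Int) from by decide] at hq; omega
        have g4 : "mistral:7b" ∉ m0 :: rest := by
          intro hm; have hq := hmin _ hm
          rw [show pvRk "mistral:7b" = (4 : Int) from by decide] at hq; omega
        have hr : res.1 = "gemma2:9b" := by rw [hresp, h]; decide
        rw [hB, hr]
        simp [pick_best_model_py, pvGoA, pvPreferred, hwk, g0, g1, g2, g3, g4]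
      · -- Mv = 6
        have hwk : "phi3:3.8b" ∈ m0 :: rest := by
          have hmm := hwmem; rw [hwp, h] at hmm; simpa [pvPreferred] using hmm
        have g0 : "llama3.1:8b" ∉ m0 :: rest := by
          intro hm; have hq := hmin _ hm
          rw [show pvRk "llama3.1:8b" = (0 : Int) from by decide] at hq; omega
        have g1 : "llama3.2:3b" ∉ m0 :: rest := by
          intro hm; have hq := hmin _ hm
          rw [show pvRk "llama3.2:3b" = (1 : Int) from by decide] at hq; omega
        have g2 : "llama3.2:1b" ∉ m0 :: rest := by
          intro hm; have hq := hmin _ hm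
          rw [show pvRk "llama3.2:1b" = (2 : Int) from by decide] at hq; omega
        have g3 : "llama3:8b" ∉ m0 :: rest := by
          intro hm; have hq := hmin _ hm
          rw [show pvRk "llama3:8b" = (3 : Int) from by decide] at hq; omega
        have g4 : "mistral:7b" ∉ m0 :: rest := by
          intro hm; have hq := hmin _ hm
          rw [show pvRk "mistral:7b" = (4 : Int) from by decide] at hq; omega
        have g5 : "gemma2:9b" ∉ m0 :: rest := by
          intro hm; have hq := hmin _ hm
          rw [show pvRk "gemma2:9b" = (5 : Int) from by decide] at hq; omega
        have hr : res.1 = "phi3:3.8b" := by rw [hresp, h]; decide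
        rw [hB, hr]
        simp [pick_best_model_py, pvGoA, pvPreferred, hwk, g0, g1, g2, g3, g4, g5]
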